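-- pv_equiv track=rewrite | github.com/canonical/imagecraft | imagecraft/losetup/server/_lxd.py | find_free_loop_slot
-- ===== SOURCE A (Python) =====
-- def find_free_loop_slot(devices: dict) -> int:
--     """Find the smallest N such that no ``imagecraft-loopN*`` device exists."""
--     used: set[int] = set()
--     for name in devices:
--         if name.startswith("imagecraft-loop"):
--             num_str = name[len("imagecraft-loop"):].split("p")[0]
--             if num_str.isdigit():
--                 used.add(int(num_str))
--     n = 0
--     while n in used:
--         n += 1
--     return n
-- ===== SOURCE B (Python) =====
-- _PREFIX = "imagecraft-loop"
--
--
-- def _loop_index(name):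
--     """Index N if name looks like imagecraft-loopN or imagecraft-loopNp..., else None."""
--     if not name.startswith(_PREFIX):
--         return None
--     s = name[len(_PREFIX):].split("p")[0]
--     return int(s) if s.isdigit() else None
--
--
-- def find_free_loop_slot(devices: dict) -> int:
--     """Find the smallest N such that no ``imagecraft-loopN*`` device exists."""
--     idxs = [i for i in (_loop_index(name) for name in devices) if i is not None]
--     n = 0
--     for v in sorted(set(idxs)):
--         if v == n:
--             n += 1
--         elif v > n:
--             break
--     return n
-- ===== Notes on version B (the rewrite author's own statement) =====
-- stated objective: alternative
-- what changed: Replaces the unbounded probe loop (n in set, n += 1) by a single ordered scan: collect the parsed indices, sort their distinct values, and advance a counter along the sorted list until the first gap.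
import Mathlib
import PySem

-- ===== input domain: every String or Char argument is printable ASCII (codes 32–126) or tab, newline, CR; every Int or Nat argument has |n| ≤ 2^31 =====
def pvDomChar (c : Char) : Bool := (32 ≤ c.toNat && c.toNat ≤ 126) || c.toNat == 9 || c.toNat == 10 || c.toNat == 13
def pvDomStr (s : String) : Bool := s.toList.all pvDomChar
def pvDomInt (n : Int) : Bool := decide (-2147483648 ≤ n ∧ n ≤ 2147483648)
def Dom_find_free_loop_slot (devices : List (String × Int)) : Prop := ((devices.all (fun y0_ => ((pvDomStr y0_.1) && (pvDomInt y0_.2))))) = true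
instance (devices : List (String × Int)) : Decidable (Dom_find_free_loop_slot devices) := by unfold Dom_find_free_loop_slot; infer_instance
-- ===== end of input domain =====

-- B replaces A's ascending membership probing of a hash set by one ordered scan of the
-- sorted distinct indices (objective: alternative, same behaviour).

-- shared by both ports: the source line  name[len("imagecraft-loop"):].split("p")[0]
-- (identical in Source A and Source B)
def pvNumStr (name : String) : String :=
  (((PySem.Str.split? (PySem.Str.slice name (some 15) none) "p").getD []).headD "")

-- ===== PORT A =====
-- loop body of A: parse one device name and add its index to the used set
def pvStepA (used : PySem.Set Int) (name : String) : PySem.Set Int :=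
  if PySem.Str.startswith name "imagecraft-loop" then
    let numStr := pvNumStr name
    if PySem.Str.strIsdigit numStr then
      -- int(numStr): ofStr? is some here since numStr is all ASCII digits (guard for totality)
      match PySem.Int.ofStr? numStr with
      | some k => PySem.Set.add used k
      | none => used
    else used
  else used

-- A's 'while n in used: n += 1'; fuel used.length + 1 suffices (proved below)
def pvWhileFree (used : PySem.Set Int) : Nat → Int → Int
  | 0, n => n
  | f + 1, n => if PySem.Set.contains used n then pvWhileFree used f (n + 1) else n

def find_free_loop_slot (devices : List (String × Int)) : Int :=
  let used : PySem.Set Int := devices.foldl (fun u nv => pvStepA u nv.1) PySem.Set.empty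
  pvWhileFree used (used.length + 1) 0

-- ===== PORT B =====
-- Source B's _loop_index
def pvLoopIndex (name : String) : Option Int :=
  if !PySem.Str.startswith name "imagecraft-loop" then none
  else
    let s := pvNumStr name
    -- int(s): ofStr? is some here since s is all ASCII digits (guard for totality)
    if PySem.Str.strIsdigit s then PySem.Int.ofStr? s else none

-- Source B's for-loop over the sorted distinct indices (break once v > n)
def pvScan : List Int → Int → Int
  | [], n => n
  | v :: vs, n => if v = n then pvScan vs (n + 1) else if n < v then n else pvScan vs n

def find_free_loop_slot_alt (devices : List (String × Int)) : Int :=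
  let idxs : List Int := (devices.map (fun nv => pvLoopIndex nv.1)).filterMap id
  pvScan (PySem.List.sorted (PySem.Set.ofList idxs) (fun x => x) false) 0

-- ===== PRECONDITION & SPEC =====
def Spec_find_free_loop_slot (devices : List (String × Int)) (out : Int) : Prop := out = find_free_loop_slot_alt devices
instance (devices : List (String × Int)) (out : Int) : Decidable (Spec_find_free_loop_slot devices out) := by unfold Spec_find_free_loop_slot; infer_instance

-- ===== CLAIM (what is proved, stated in full; the proofs are below) =====
def Claim_equal_find_free_loop_slot : Prop := ∀ (devices : List (String × Int)), Dom_find_free_loop_slot devices → Spec_find_free_loop_slot devices (find_free_loop_slot devices)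

-- ===== LEMMAS AND PROOFS =====

-- A's loop body is pvLoopIndex's answer folded into the set
theorem pvStepA_eq (used : PySem.Set Int) (name : String) :
    pvStepA used name = match pvLoopIndex name with
      | some k => PySem.Set.add used k
      | none => used := by
  unfold pvStepA pvLoopIndex
  generalize PySem.Str.startswith name "imagecraft-loop" = bs
  cases bs <;>
    cases hd : PySem.Chars.strIsdigit (pvNumStr name).toList <;>
    cases ho : PySem.Int.ofStr? (pvNumStr name) <;>
    simp [hd, ho]

-- A's fold builds exactly set(idxs) of B's list
theorem fold_eq_ofList (names : List (String × Int)) (acc : List Int) :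
    names.foldl (fun u nv => pvStepA u nv.1) (PySem.Set.ofList acc) =
      PySem.Set.ofList (acc ++ (names.map (fun nv => pvLoopIndex nv.1)).filterMap id) := by
  induction names generalizing acc with
  | nil => simp
  | cons nv rest ih =>
    simp only [List.foldl_cons, List.map_cons, List.filterMap_cons]
    rw [pvStepA_eq]
    cases h : pvLoopIndex nv.1 with
    | none => simpa using ih acc
    | some k =>
      have hadd : PySem.Set.add (PySem.Set.ofList acc) k = PySem.Set.ofList (acc ++ [k]) := by
        simp [PySem.Set.ofList_eq_foldl, List.foldl_append]
      simp only [hadd]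
      simpa using ih (acc ++ [k])

-- spec of A's while loop: first value ≥ n not in used, given enough fuel
theorem pvWhileFree_spec (used : PySem.Set Int) (f : Nat) :
    ∀ n : Int, (∃ m : Int, n ≤ m ∧ m < n + f ∧ m ∉ used) →
      pvWhileFree used f n ∉ used ∧ n ≤ pvWhileFree used f n ∧
        ∀ k : Int, n ≤ k → k < pvWhileFree used f n → k ∈ used := by
  induction f with
  | zero =>
    intro n ⟨m, h1, h2, _⟩
    simp only [Nat.cast_zero, add_zero] at h2
    omega
  | succ f ih =>
    intro n ⟨m, h1, h2, h3⟩
    have hstep : pvWhileFree used (f + 1) n =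
        if n ∈ used then pvWhileFree used f (n + 1) else n := by
      simp [pvWhileFree]
    by_cases hn : n ∈ used
    · have hm : n + 1 ≤ m := by
        rcases lt_or_eq_of_le h1 with h | h
        · omega
        · exact absurd (h ▸ hn) h3
      obtain ⟨r1, r2, r3⟩ := ih (n + 1) ⟨m, hm, by push_cast at h2 ⊢; omega, h3⟩
      rw [hstep, if_pos hn]
      refine ⟨r1, by omega, ?_⟩
      intro k hk1 hk2
      rcases lt_or_eq_of_le hk1 with h | h
      · exact r3 k (by omega) hk2
      · exact h ▸ hn
    · rw [hstep, if_neg hn]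
      exact ⟨hn, le_refl n, fun k hk1 hk2 => absurd hk2 (by omega)⟩

-- spec of B's scan on a strictly increasing list
theorem pvScan_spec (l : List Int) :
    ∀ n : Int, l.Pairwise (· < ·) →
      pvScan l n ∉ l ∧ n ≤ pvScan l n ∧
        ∀ k : Int, n ≤ k → k < pvScan l n → k ∈ l := by
  induction l with
  | nil => intro n _; simp [pvScan]
  | cons v vs ih =>
    intro n hp
    have hv : ∀ x ∈ vs, v < x := (List.pairwise_cons.mp hp).1
    have hp' : vs.Pairwise (· < ·) := (List.pairwise_cons.mp hp).2
    by_cases h1 : v = n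
    · obtain ⟨r1, r2, r3⟩ := ih (n + 1) hp'
      have hs : pvScan (v :: vs) n = pvScan vs (n + 1) := by simp [pvScan, h1]
      rw [hs]
      refine ⟨?_, by omega, ?_⟩
      · simp only [List.mem_cons, not_or]
        exact ⟨by omega, r1⟩
      · intro k hk1 hk2
        rcases lt_or_eq_of_le hk1 with h | h
        · exact List.mem_cons_of_mem v (r3 k (by omega) hk2)
        · simp [← h, h1]
    · by_cases h2 : n < v
      · have hs : pvScan (v :: vs) n = n := by simp [pvScan, h1, h2]
        rw [hs]
        refine ⟨?_, le_refl n, fun k hk1 hk2 => absurd hk2 (by omega)⟩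
        simp only [List.mem_cons, not_or]
        exact ⟨by omega, fun hn => absurd (hv n hn) (by omega)⟩
      · obtain ⟨r1, r2, r3⟩ := ih n hp'
        have hs : pvScan (v :: vs) n = pvScan vs n := by simp [pvScan, h1, h2]
        rw [hs]
        refine ⟨?_, r2, ?_⟩
        · simp only [List.mem_cons, not_or]
          refine ⟨by omega, r1⟩
        · intro k hk1 hk2
          exact List.mem_cons_of_mem v (r3 k hk1 hk2)

-- a nodup list of length L misses some integer in [0, L]
theorem exists_gap (used : List Int) :
    ∃ m : Int, 0 ≤ m ∧ m < (0 : Int) + ((used.length + 1 : Nat) : Int) ∧ m ∉ used := by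
  by_contra hcon
  push Not at hcon
  have hsub : ((List.range (used.length + 1)).map (fun j : Nat => (j : Int))) ⊆ used := by
    intro x hx
    simp only [List.mem_map, List.mem_range] at hx
    obtain ⟨j, hj, rfl⟩ := hx
    exact hcon _ (Int.natCast_nonneg j) (by push_cast; omega)
  have hinj : Function.Injective (fun j : Nat => (j : Int)) := fun a b h => by simpa using h
  have hnd2 : ((List.range (used.length + 1)).map (fun j : Nat => (j : Int))).Nodup :=
    List.Nodup.map hinj List.nodup_range
  have hle := (hnd2.subperm hsub).length_le
  simp only [List.length_map, List.length_range] at hle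
  omega

-- both specs pin the same unique value
theorem main_gen (used : PySem.Set Int) (idxs : List Int) (h : used = PySem.Set.ofList idxs) :
    pvWhileFree used (used.length + 1) 0 =
      pvScan (PySem.List.sorted (PySem.Set.ofList idxs) (fun x => x) false) 0 := by
  set l := PySem.List.sorted (PySem.Set.ofList idxs) (fun x => x) false with hl
  have hmem : ∀ x : Int, x ∈ l ↔ x ∈ used := by
    intro x
    rw [hl, h]
    exact PySem.List.mem_sorted _ _ _ _
  obtain ⟨a1, a2, a3⟩ := pvWhileFree_spec used (used.length + 1) 0 (exists_gap used)
  obtain ⟨b1, b2, b3⟩ := pvScan_spec l 0 (PySem.List.sorted_ofList_pairwise_lt idxs)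
  set rA := pvWhileFree used (used.length + 1) 0
  set rB := pvScan l 0
  rcases lt_trichotomy rA rB with hlt | heq | hgt
  · exact absurd ((hmem rA).mp (b3 rA a2 hlt)) a1
  · exact heq
  · exact absurd ((hmem rB).mpr (a3 rB b2 hgt)) b1

-- ===== VERDICT (by name: the statement is the Claim_ definition above) =====
theorem find_free_loop_slot_spec : Claim_equal_find_free_loop_slot := by
  intro devices _
  unfold Spec_find_free_loop_slot find_free_loop_slot find_free_loop_slot_alt
  exact main_gen _ _ (by simpa using fold_eq_ofList devices [])
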